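-- pv_equiv track=rewrite | github.com/tirtza-weinfeld/hippocampx | backend/scripts/problems/generate_symbol_tags copy 2.py | _process_expressions_dict
-- ===== SOURCE A (Python) =====
-- def _process_expressions_dict(lines: list[str]) -> dict[str, str]:
--     """Parse expressions into quoted expression -> description mapping with multi-line support."""
--     result: dict[str, str] = {}
--     i = 0
--
--     while i < len(lines):
--         line = lines[i].rstrip()
--
--         # Skip empty lines
--         if not line.strip():
--             i += 1
--             continue
--
--         # Look for expression lines (contain colon and typically start with quote)
--         if ':' in line:
--             expr_part, desc_part = line.split(':', 1)
--             expr_clean = expr_part.strip().strip("'\"")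
--
--             # Start building the description
--             description_lines = [desc_part.strip()] if desc_part.strip() else []
--
--             # Get base indentation level for this expression
--             base_indent = len(line) - len(line.lstrip())
--
--             # Look ahead for continuation lines (more indented)
--             i += 1
--             while i < len(lines):
--                 next_line = lines[i].rstrip()
--
--                 # Empty line - include it and continue
--                 if not next_line.strip():
--                     description_lines.append("")
--                     i += 1
--                     continue
--
--                 next_indent = len(next_line) - len(next_line.lstrip())
--
--                 # If this line is more indented than the base expression, it belongs to this expression
--                 if next_indent > base_indent:
--                     description_lines.append(next_line)
--                     i += 1
--                 else:
--                     # This line is at the same level or less indented, so it's a new expression or end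
--                     break
--
--             # Join all description lines and store
--             full_description = '\n'.join(description_lines).strip()
--             if full_description:
--                 result[expr_clean] = full_description
--         else:
--             # Line without colon, skip it
--             i += 1
--
--     return result
-- ===== SOURCE B (Python) =====
-- def _process_expressions_dict(lines: list[str]) -> dict[str, str]:
--     """Single flat pass over lines as a state machine: the state is the currently
--     open block (key, base indent, collected parts) or None; each line either
--     extends the open block, or closes/flushes it and possibly opens a new one."""
--     result: dict[str, str] = {}
--     open_block = None  # (key, base_indent, parts)
--
--     def flush():
--         if open_block is not None:
--             key, _, parts = open_block
--             desc = '\n'.join(parts).strip()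
--             if desc:
--                 result[key] = desc
--
--     for raw in lines:
--         s = raw.rstrip()
--         if open_block is not None:
--             if not s.strip():
--                 open_block[2].append("")
--                 continue
--             if len(s) - len(s.lstrip()) > open_block[1]:
--                 open_block[2].append(s)
--                 continue
--             flush()
--             open_block = None
--         if not s.strip() or ':' not in s:
--             continue
--         expr, tail = s.split(':', 1)
--         parts = [tail.strip()] if tail.strip() else []
--         open_block = (expr.strip().strip("'\""), len(s) - len(s.lstrip()), parts)
--     flush()
--     return result
-- ===== Notes on version B (the rewrite author's own statement) =====
-- stated objective: alternative
-- what changed: Replaces A's nested while loops with a shared cursor (outer scan + inner look-ahead loop per header) by a single flat for-loop state machine whose state is the currently open block (key, base indent, parts) or None; each line either extends the open block or flushes it and possibly opens a new one, with one final flush at the end.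
import Mathlib
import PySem

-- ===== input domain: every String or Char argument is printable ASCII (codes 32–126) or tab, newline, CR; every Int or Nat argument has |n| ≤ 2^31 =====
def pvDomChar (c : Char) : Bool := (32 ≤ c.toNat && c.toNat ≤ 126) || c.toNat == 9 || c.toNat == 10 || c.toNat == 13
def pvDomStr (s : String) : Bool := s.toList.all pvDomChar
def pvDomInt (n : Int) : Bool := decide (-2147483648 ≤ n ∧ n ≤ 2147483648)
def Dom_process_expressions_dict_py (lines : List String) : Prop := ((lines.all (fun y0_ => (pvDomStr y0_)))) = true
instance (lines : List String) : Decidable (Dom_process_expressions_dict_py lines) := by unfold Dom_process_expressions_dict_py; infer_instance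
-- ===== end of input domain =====

-- B replaces A's nested while loops (outer cursor scan + inner per-header look-ahead loop) by a
-- single flat pass: a state machine whose state is the currently open block or None, flushed on
-- close and once at the end; same asymptotic cost (objective: alternative).

-- ===== PORT A =====
-- indentation = len(line) - len(line.lstrip()); the same expression occurs in both Pythons
def pvIndent (s : String) : Int := PySem.Str.len s - PySem.Str.len (PySem.Str.lstrip s)

-- A's inner `while` loop: absorbs continuation lines into `acc`, returns (description_lines, remaining lines)
def pvA_absorb (base : Int) : List String → List String → List String × List String
  | [], acc => (acc, [])
  | l :: rest, acc =>
    let next_line := PySem.Str.rstrip l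
    if PySem.Str.strip next_line = "" then pvA_absorb base rest (acc ++ [""])
    else if base < pvIndent next_line then pvA_absorb base rest (acc ++ [next_line])
    else (acc, l :: rest)

-- needed by pvA_loop's decreasing_by: the absorb loop never lengthens the remaining input
theorem pvAbsorb_len (base : Int) : ∀ (rest acc : List String),
    (pvA_absorb base rest acc).2.length ≤ rest.length
  | [], acc => by simp [pvA_absorb]
  | l :: rest, acc => by
    simp only [pvA_absorb]
    split_ifs with h1 h2
    · exact le_trans (pvAbsorb_len base rest _) (Nat.le_succ _)
    · exact le_trans (pvAbsorb_len base rest _) (Nat.le_succ _)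
    · simp

-- A's outer `while` loop over the cursor i
def pvA_loop : List String → PySem.Dict String String → PySem.Dict String String
  | [], result => result
  | l :: rest, result =>
    let line := PySem.Str.rstrip l
    if PySem.Str.strip line = "" then pvA_loop rest result
    else if PySem.Str.isIn ":" line then
      let parts := (PySem.Str.splitMax? line ":" 1).getD []
      let expr_part := parts.headD ""
      let desc_part := parts.getD 1 ""
      let expr_clean := PySem.Str.stripChars (PySem.Str.strip expr_part) "'\""
      let dls : List String := if PySem.Str.strip desc_part = "" then [] else [PySem.Str.strip desc_part]
      let r := pvA_absorb (pvIndent line) rest dls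
      let full := PySem.Str.strip (PySem.Str.join "\n" r.1)
      pvA_loop r.2 (if full = "" then result else PySem.Dict.insert result expr_clean full)
    else pvA_loop rest result
  termination_by ls _ => ls.length
  decreasing_by
  · simp
  · exact Nat.lt_succ_of_le (pvAbsorb_len _ _ _)
  · simp

def process_expressions_dict_py (lines : List String) : List (String × String) :=
  (pvA_loop lines PySem.Dict.empty).items

-- ===== PORT B =====
-- B's `flush`: close the open block (if any), storing its description when non-empty
def pvB_flush (d : PySem.Dict String String) :
    Option (String × Int × List String) → PySem.Dict String String
  | none => d
  | some (key, _, parts) =>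
    let desc := PySem.Str.strip (PySem.Str.join "\n" parts)
    if desc = "" then d else PySem.Dict.insert d key desc

-- B's no-open-block handling of a (rstripped) line: skip, or open a new block
def pvB_fresh (d : PySem.Dict String String) (s : String) :
    PySem.Dict String String × Option (String × Int × List String) :=
  if PySem.Str.strip s = "" then (d, none)
  else if PySem.Str.isIn ":" s then
    let parts := (PySem.Str.splitMax? s ":" 1).getD []
    let expr := parts.headD ""
    let tail := parts.getD 1 ""
    let key := PySem.Str.stripChars (PySem.Str.strip expr) "'\""
    let ps : List String := if PySem.Str.strip tail = "" then [] else [PySem.Str.strip tail]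
    (d, some (key, pvIndent s, ps))
  else (d, none)

-- B's loop body: extend the open block, or flush it and handle the line fresh
def pvB_step (st : PySem.Dict String String × Option (String × Int × List String))
    (raw : String) : PySem.Dict String String × Option (String × Int × List String) :=
  let s := PySem.Str.rstrip raw
  match st with
  | (d, none) => pvB_fresh d s
  | (d, some (key, base, parts)) =>
    if PySem.Str.strip s = "" then (d, some (key, base, parts ++ [""]))
    else if base < pvIndent s then (d, some (key, base, parts ++ [s]))
    else pvB_fresh (pvB_flush d (some (key, base, parts))) s

def process_expressions_dict_py_alt (lines : List String) : List (String × String) :=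
  let st := lines.foldl pvB_step (PySem.Dict.empty, none)
  (pvB_flush st.1 st.2).items

-- ===== PRECONDITION & SPEC =====
def Spec_process_expressions_dict_py (lines : List String) (out : List (String × String)) : Prop := out = process_expressions_dict_py_alt lines
instance (lines : List String) (out : List (String × String)) : Decidable (Spec_process_expressions_dict_py lines out) := by unfold Spec_process_expressions_dict_py; infer_instance

-- ===== CLAIM (what is proved, stated in full; the proofs are below) =====
def Claim_equal_process_expressions_dict_py : Prop := ∀ (lines : List String), Dom_process_expressions_dict_py lines → Spec_process_expressions_dict_py lines (process_expressions_dict_py lines)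

-- ===== LEMMAS AND PROOFS =====

-- run B's fold from a given state and apply the final flush
def pvB_run (ls : List String)
    (st : PySem.Dict String String × Option (String × Int × List String)) :
    PySem.Dict String String :=
  let r := ls.foldl pvB_step st
  pvB_flush r.1 r.2

-- invariant with no open block: B's run equals A's outer loop
def pvPP (ls : List String) : Prop := ∀ d, pvB_run ls (d, none) = pvA_loop ls d

-- invariant with an open block: B's run equals A's absorb followed by flush and outer loop
def pvQQ (ls : List String) : Prop := ∀ d key base parts,
    pvB_run ls (d, some (key, base, parts)) =
      pvA_loop (pvA_absorb base ls parts).2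
        (pvB_flush d (some (key, base, (pvA_absorb base ls parts).1)))

theorem pvRun_cons (l : String) (ls : List String) st :
    pvB_run (l :: ls) st = pvB_run ls (pvB_step st l) := by
  simp [pvB_run]

theorem pvFreshRun (ls : List String) (l : String) (hP : pvPP ls) (hQ : pvQQ ls)
    (hnb : ¬ PySem.Str.strip (PySem.Str.rstrip l) = "") :
    ∀ d, pvB_run ls (pvB_fresh d (PySem.Str.rstrip l)) = pvA_loop (l :: ls) d := by
  intro d
  by_cases hc : PySem.Str.isIn ":" (PySem.Str.rstrip l) = true
  · simp only [pvB_fresh, if_neg hnb, if_pos hc]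
    rw [hQ]
    simp only [pvA_loop, if_neg hnb, if_pos hc, pvB_flush]
  · have hc' : PySem.Str.isIn ":" (PySem.Str.rstrip l) = false := by simpa using hc
    simp only [pvB_fresh, if_neg hnb, hc', Bool.false_eq_true, if_false]
    rw [hP]
    simp only [pvA_loop, if_neg hnb, hc', Bool.false_eq_true, if_false]

theorem pvPQ : ∀ ls : List String, pvPP ls ∧ pvQQ ls := by
  intro ls
  induction ls with
  | nil =>
    constructor
    · intro d; simp [pvB_run, pvB_flush, pvA_loop]
    · intro d key base parts; simp [pvB_run, pvA_absorb, pvA_loop]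
  | cons l rest ih =>
    obtain ⟨hP, hQ⟩ := ih
    constructor
    · intro d
      rw [pvRun_cons]
      by_cases hb : PySem.Str.strip (PySem.Str.rstrip l) = ""
      · simp only [pvB_step, pvB_fresh, if_pos hb]
        rw [hP]
        simp only [pvA_loop, if_pos hb]
      · simp only [pvB_step]
        rw [pvFreshRun rest l hP hQ hb]
    · intro d key base parts
      rw [pvRun_cons]
      by_cases hb : PySem.Str.strip (PySem.Str.rstrip l) = ""
      · simp only [pvB_step, if_pos hb]
        rw [hQ]
        simp only [pvA_absorb, if_pos hb]
      · by_cases hi : base < pvIndent (PySem.Str.rstrip l)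
        · simp only [pvB_step, if_neg hb, if_pos hi]
          rw [hQ]
          simp only [pvA_absorb, if_neg hb, if_pos hi]
        · simp only [pvB_step, if_neg hb, if_neg hi]
          rw [pvFreshRun rest l hP hQ hb]
          simp only [pvA_absorb, if_neg hb, if_neg hi]

-- ===== VERDICT (by name: the statement is the Claim_ definition above) =====
theorem process_expressions_dict_py_spec : Claim_equal_process_expressions_dict_py := by
  intro lines _
  unfold Spec_process_expressions_dict_py process_expressions_dict_py process_expressions_dict_py_alt
  exact congrArg PySem.Dict.items ((pvPQ lines).1 PySem.Dict.empty).symm
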